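-- pv_equiv track=rewrite | github.com/cjsrxzdyzds/pythonProject | main.py | find_largest_circular_shifted_element
-- ===== SOURCE A (Python) =====
-- def find_largest_circular_shifted_element(circularly_shifted_array):
--     left, right = 0, len(circularly_shifted_array) - 1
--
--     while left < right:
--         mid = (left + right) // 2
--
--         if circularly_shifted_array[mid] > circularly_shifted_array[right]:
--             left = mid + 1
--         else:
--             right = mid
--
--     return circularly_shifted_array[left - 1]
-- ===== SOURCE B (Python) =====
-- def find_largest_circular_shifted_element(circularly_shifted_array):
--     a = circularly_shifted_array
--
--     def go(lo, w):
--         # search window is [lo, lo + w]; recursion on the width w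
--         if w == 0:
--             return lo
--         half = w // 2
--         if a[lo + half] > a[lo + w]:
--             return go(lo + half + 1, w - half - 1)
--         return go(lo, half)
--
--     return a[go(0, len(a) - 1) - 1]
-- ===== Notes on version B (the rewrite author's own statement) =====
-- stated objective: alternative
-- what changed: The iterative two-endpoint (left,right) loop over Int-like indices is re-expressed as a structural recursion over the window WIDTH: a helper go(lo, w) keeps an offset and a nonnegative width, computes the midpoint as lo + w//2, and recurses on a strictly smaller width; same comparison path and same array[index-1] result.
import Mathlib
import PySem

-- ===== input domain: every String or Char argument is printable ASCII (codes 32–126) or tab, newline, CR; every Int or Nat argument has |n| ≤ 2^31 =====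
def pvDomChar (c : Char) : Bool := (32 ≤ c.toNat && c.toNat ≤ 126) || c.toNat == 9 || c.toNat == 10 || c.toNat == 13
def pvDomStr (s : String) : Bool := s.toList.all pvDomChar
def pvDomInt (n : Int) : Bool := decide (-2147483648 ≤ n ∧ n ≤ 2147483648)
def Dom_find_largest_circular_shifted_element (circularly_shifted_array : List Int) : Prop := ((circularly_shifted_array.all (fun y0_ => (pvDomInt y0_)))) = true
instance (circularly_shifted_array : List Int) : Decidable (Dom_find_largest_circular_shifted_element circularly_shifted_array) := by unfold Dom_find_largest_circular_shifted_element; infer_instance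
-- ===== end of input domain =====

-- B replaces A's two-endpoint (left, right) while-loop by a recursion over the window WIDTH
-- (offset lo + nonnegative width w), same comparison path (objective: alternative decomposition).

-- ===== PORT A =====
-- the while-loop of A: state (left, right); fuel is only a totality guard — the gap
-- right - left strictly shrinks each iteration, so fuel = length of the list suffices
def pvA_loop (a : List Int) : Nat → Int → Int → Int
  | 0, left, _ => left
  | fuel + 1, left, right =>
    if left < right then
      let mid := PySem.Int.floordiv (left + right) 2
      if PySem.List.pyGetD a mid 0 > PySem.List.pyGetD a right 0 then
        pvA_loop a fuel (mid + 1) right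
      else
        pvA_loop a fuel left mid
    else
      left

def find_largest_circular_shifted_element (circularly_shifted_array : List Int) : Int :=
  let left := pvA_loop circularly_shifted_array circularly_shifted_array.length 0
    ((circularly_shifted_array.length : Int) - 1)
  PySem.List.pyGetD circularly_shifted_array (left - 1) 0

-- ===== PORT B =====
-- B's helper go(lo, w): window [lo, lo+w], recursion on the width w; the same fuel guard
-- (indices lo + w/2 and lo + w are nonnegative on every input B is claimed on, so
--  List.getD over Nat is exact for Python's a[lo+half] / a[lo+w] there)
def pvB_go (a : List Int) : Nat → Nat → Nat → Nat
  | 0, lo, _ => lo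
  | fuel + 1, lo, w =>
    if w = 0 then
      lo
    else
      let half := w / 2
      if a.getD (lo + half) 0 > a.getD (lo + w) 0 then
        pvB_go a fuel (lo + half + 1) (w - half - 1)
      else
        pvB_go a fuel lo half

def find_largest_circular_shifted_element_alt (circularly_shifted_array : List Int) : Int :=
  PySem.List.pyGetD circularly_shifted_array
    (((pvB_go circularly_shifted_array circularly_shifted_array.length 0 (circularly_shifted_array.length - 1) : Nat) : Int) - 1) 0

-- ===== PRECONDITION & SPEC =====
-- Pre_ excludes only the empty list, on which A raises IndexError (array[-1] on [])
def Pre_find_largest_circular_shifted_element (circularly_shifted_array : List Int) : Prop :=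
  circularly_shifted_array ≠ []
instance (circularly_shifted_array : List Int) : Decidable (Pre_find_largest_circular_shifted_element circularly_shifted_array) := by unfold Pre_find_largest_circular_shifted_element; infer_instance

def pvWitness_find_largest_circular_shifted_element : List Int := [4, 5, 1, 2, 3]

def Spec_find_largest_circular_shifted_element (circularly_shifted_array : List Int) (out : Int) : Prop := out = find_largest_circular_shifted_element_alt circularly_shifted_array
instance (circularly_shifted_array : List Int) (out : Int) : Decidable (Spec_find_largest_circular_shifted_element circularly_shifted_array out) := by unfold Spec_find_largest_circular_shifted_element; infer_instance

-- ===== CLAIM (what is proved, stated in full; the proofs are below) =====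
def Claim_equal_find_largest_circular_shifted_element : Prop := ∀ (circularly_shifted_array : List Int), Dom_find_largest_circular_shifted_element circularly_shifted_array → Pre_find_largest_circular_shifted_element circularly_shifted_array → Spec_find_largest_circular_shifted_element circularly_shifted_array (find_largest_circular_shifted_element circularly_shifted_array)

-- ===== LEMMAS AND PROOFS =====
-- on the window [lo, lo+w], A's loop and B's width recursion compute the same final index
theorem pvA_loop_eq_pvB_go (a : List Int) : ∀ (fuel : Nat) (lo w : Nat),
    pvA_loop a fuel (lo : Int) ((lo : Int) + (w : Int)) = ((pvB_go a fuel lo w : Nat) : Int) := by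
  intro fuel
  induction fuel with
  | zero => intro lo w; rfl
  | succ fuel ih =>
    intro lo w
    rw [pvA_loop, pvB_go]
    by_cases hw : w = 0
    · subst hw
      rw [if_neg (by omega), if_pos rfl]
    · rw [if_pos (by omega : (lo : Int) < (lo : Int) + (w : Int)), if_neg hw]
      have hmid : PySem.Int.floordiv ((lo : Int) + ((lo : Int) + (w : Int))) 2
          = ((lo + w / 2 : Nat) : Int) := by
        rw [PySem.Int.floordiv_eq_ediv_of_pos (by omega : (0:Int) < 2)]
        omega
      rw [hmid]
      have hm : PySem.List.pyGetD a ((lo + w / 2 : Nat) : Int) 0 = a.getD (lo + w / 2) 0 :=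
        PySem.List.pyGetD_natCast a _ 0
      have hr : PySem.List.pyGetD a ((lo : Int) + (w : Int)) 0 = a.getD (lo + w) 0 := by
        rw [show (lo : Int) + (w : Int) = ((lo + w : Nat) : Int) by push_cast; ring]
        exact PySem.List.pyGetD_natCast a _ 0
      dsimp only
      rw [hm, hr]
      split_ifs with hc
      · have := ih (lo + w / 2 + 1) (w - w / 2 - 1)
        rw [show ((lo + w / 2 : Nat) : Int) + 1 = ((lo + w / 2 + 1 : Nat) : Int) by push_cast; ring,
            show (lo : Int) + (w : Int) = ((lo + w / 2 + 1 : Nat) : Int) + ((w - w / 2 - 1 : Nat) : Int) by push_cast; omega]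
        rw [this]
      · have := ih lo (w / 2)
        rw [show ((lo + w / 2 : Nat) : Int) = (lo : Int) + ((w / 2 : Nat) : Int) by push_cast; ring]
        exact this

-- ===== VERDICT (by name: the statement is the Claim_ definition above) =====
theorem find_largest_circular_shifted_element_spec : Claim_equal_find_largest_circular_shifted_element := by
  intro a _ hne
  unfold Spec_find_largest_circular_shifted_element
  unfold find_largest_circular_shifted_element find_largest_circular_shifted_element_alt
  have hlen : 1 ≤ a.length := List.length_pos_iff.mpr hne
  have key := pvA_loop_eq_pvB_go a a.length 0 (a.length - 1)
  norm_num at key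
  rw [show ((a.length : Int) - 1) = ((a.length - 1 : Nat) : Int) by omega, key]
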